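-- pv_equiv track=rewrite | github.com/JustAHobbyDev/cortex | scripts/phase2_retrieval_eval_harness_v0.py | _tokenize
-- ===== SOURCE A (Python) =====
-- def _tokenize(value: str) -> list[str]:
--     token = []
--     out: list[str] = []
--     for ch in value.lower():
--         if ch.isalnum():
--             token.append(ch)
--             continue
--         if token:
--             t = "".join(token)
--             if len(t) >= 3:
--                 out.append(t)
--             token = []
--     if token:
--         t = "".join(token)
--         if len(t) >= 3:
--             out.append(t)
--     return out
-- ===== SOURCE B (Python) =====
-- def _tokenize(value: str) -> list[str]:
--     s = value.lower()
--     n = len(s)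
--     out: list[str] = []
--     i = 0
--     while i < n:
--         if s[i].isalnum():
--             j = i
--             while j < n and s[j].isalnum():
--                 j += 1
--             if j - i >= 3:
--                 out.append(s[i:j])
--             i = j
--         else:
--             i += 1
--     return out
-- ===== Notes on version B (the rewrite author's own statement) =====
-- stated objective: alternative
-- what changed: B scans the lowered string with a two-pointer run scanner that slices out each maximal alnum run directly, instead of A's character-buffer accumulation with a separate post-loop flush.
import Mathlib
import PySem

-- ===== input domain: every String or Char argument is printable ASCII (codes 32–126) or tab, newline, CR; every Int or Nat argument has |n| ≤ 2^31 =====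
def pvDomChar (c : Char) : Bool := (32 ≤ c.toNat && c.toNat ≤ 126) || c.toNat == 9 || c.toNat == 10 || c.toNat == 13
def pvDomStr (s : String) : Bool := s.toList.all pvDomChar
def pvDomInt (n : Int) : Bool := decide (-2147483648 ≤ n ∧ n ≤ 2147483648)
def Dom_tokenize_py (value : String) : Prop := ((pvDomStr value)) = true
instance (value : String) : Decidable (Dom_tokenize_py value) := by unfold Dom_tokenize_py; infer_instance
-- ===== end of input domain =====

-- B replaces A's character-buffer accumulation + post-loop flush with a two-pointer
-- run scanner over the lowered string (alternative decomposition; same cost).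

-- ===== PORT A =====
-- one loop step: ch alnum → extend token; else flush token if nonempty and long enough
def tokA_step (st : List Char × List String) (ch : Char) : List Char × List String :=
  if PySem.Chars.isalnum ch then (st.1 ++ [ch], st.2)
  else if st.1 ≠ [] then
    ([], if 3 ≤ st.1.length then st.2 ++ [String.ofList st.1] else st.2)
  else st

def tokenize_py (value : String) : List String :=
  let st := (PySem.Chars.lower value.toList).foldl tokA_step ([], [])
  if st.1 ≠ [] then
    (if 3 ≤ st.1.length then st.2 ++ [String.ofList st.1] else st.2)
  else st.2

-- ===== PORT B =====
-- run scanner: at an alnum position take the maximal alnum run (inner while j),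
-- emit it if length ≥ 3, resume after it; otherwise advance one char
def tokB_go : List Char → List String
  | [] => []
  | c :: cs =>
    if PySem.Chars.isalnum c then
      let run := (c :: cs).takeWhile PySem.Chars.isalnum
      (if 3 ≤ run.length then [String.ofList run] else []) ++
        tokB_go (cs.dropWhile PySem.Chars.isalnum)
    else tokB_go cs
termination_by l => l.length
decreasing_by
  · exact Nat.lt_succ_of_le (List.length_dropWhile_le _ _)
  · exact Nat.lt_succ_self _

def tokenize_py_alt (value : String) : List String :=
  tokB_go (PySem.Chars.lower value.toList)

-- ===== PRECONDITION & SPEC =====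
def Spec_tokenize_py (value : String) (out : List String) : Prop := out = tokenize_py_alt value
instance (value : String) (out : List String) : Decidable (Spec_tokenize_py value out) := by unfold Spec_tokenize_py; infer_instance

-- ===== CLAIM (what is proved, stated in full; the proofs are below) =====
def Claim_equal_tokenize_py : Prop := ∀ (value : String), Dom_tokenize_py value → Spec_tokenize_py value (tokenize_py value)

-- ===== LEMMAS AND PROOFS =====

-- proof helper: A's fold from pending token `tok`, flushed at the end, described run-wise
def glue (tok : List Char) : List Char → List String
  | [] => if 3 ≤ tok.length then [String.ofList tok] else []
  | c :: cs =>
    if PySem.Chars.isalnum c then glue (tok ++ [c]) cs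
    else (if 3 ≤ tok.length then [String.ofList tok] else []) ++ glue [] cs

def tokA_fin (st : List Char × List String) : List String :=
  if st.1 ≠ [] then
    (if 3 ≤ st.1.length then st.2 ++ [String.ofList st.1] else st.2)
  else st.2

lemma foldl_glue (l : List Char) : ∀ (tok : List Char) (out : List String),
    tokA_fin (l.foldl tokA_step (tok, out)) = out ++ glue tok l := by
  induction l with
  | nil =>
    intro tok out
    by_cases h : tok = []
    · subst h; simp [tokA_fin, glue]
    · simp only [List.foldl_nil, tokA_fin, glue, h, ne_eq, not_false_iff, if_true]
      split_ifs <;> simp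
  | cons c cs ih =>
    intro tok out
    by_cases ha : PySem.Chars.isalnum c
    · simp [tokA_step, ha, ih, glue]
    · by_cases h : tok = []
      · subst h; simp [tokA_step, ha, ih, glue]
      · simp only [List.foldl_cons, tokA_step, ha, h, ne_eq, not_false_iff, if_true,
          glue, ih]
        split_ifs <;> simp
lemma glue_nil_eq_go (l : List Char) : glue [] l = tokB_go l := by
  induction l using tokB_go.induct with
  | case1 => simp [glue, tokB_go]
  | case2 c cs ha ih =>
    rw [tokB_go]
    simp only [ha, if_true, List.takeWhile_cons_of_pos ha]
    -- glue consumes the run character by character; relate to takeWhile/dropWhile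
    -- glue tok ys described via takeWhile/dropWhile
    have main : ∀ (ys : List Char) (tok : List Char),
        glue tok ys =
          (if 3 ≤ (tok ++ ys.takeWhile PySem.Chars.isalnum).length then
              [String.ofList (tok ++ ys.takeWhile PySem.Chars.isalnum)] else []) ++
            glue [] (match ys.dropWhile PySem.Chars.isalnum with
                     | [] => []
                     | _ :: t => t) := by
      intro ys
      induction ys with
      | nil => intro tok; simp [glue]
      | cons d ds ihd =>
        intro tok
        by_cases hd : PySem.Chars.isalnum d
        · rw [glue]
          simp only [hd, if_true, List.takeWhile_cons_of_pos hd,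
            List.dropWhile_cons_of_pos hd, ihd]
          simp
        · rw [glue]
          simp [List.takeWhile_cons_of_neg, List.dropWhile_cons_of_neg, hd]
    rw [main (c :: cs) []]
    simp only [List.takeWhile_cons_of_pos ha, List.dropWhile_cons_of_pos ha, List.nil_append]
    cases h : cs.dropWhile PySem.Chars.isalnum with
    | nil => simp [glue, tokB_go]
    | cons d ds =>
      have hd : PySem.Chars.isalnum d = false := by
        have h2 := List.head?_dropWhile_not (p := PySem.Chars.isalnum) (l := cs)
        rw [h] at h2; simpa using h2
      have hgo : tokB_go (d :: ds) = tokB_go ds := by rw [tokB_go]; simp [hd]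
      have hg : glue [] (d :: ds) = glue [] ds := by rw [glue]; simp [hd]
      rw [h, hgo, hg] at ih
      simp [ih, hgo]
  | case3 c cs ha ih =>
    rw [glue, tokB_go]
    simp [ha, ih]

-- ===== VERDICT (by name: the statement is the Claim_ definition above) =====
theorem tokenize_py_spec : Claim_equal_tokenize_py := by
  intro value _
  show tokenize_py value = tokenize_py_alt value
  have h := foldl_glue (PySem.Chars.lower value.toList) [] []
  unfold tokenize_py tokenize_py_alt
  rw [← glue_nil_eq_go]
  simpa [tokA_fin] using h
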